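-- pv_equiv track=rewrite | github.com/ibbles/LearningUncrustify | src/gui_diff_application.py | split_chunks_at_equal_lines
-- ===== SOURCE A (Python) =====
-- def split_chunks_at_equal_lines(opcodes, a, b):
--     result = []
--     for tag, i1, i2, j1, j2 in opcodes:
--         if tag in ("replace", "delete", "insert"):
--             ai, bi = i1, j1
--             while ai < i2 or bi < j2:
--                 # Check if both lines exist and are equal and non-empty
--                 if ai < i2 and bi < j2 and a[ai] == b[bi] and a[ai].strip() != "":
--                     # Emit previous chunk if any
--                     if ai > i1 or bi > j1:
--                         result.append((tag, i1, ai, j1, bi))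
--                     # Emit equal chunk for this line
--                     result.append(("equal", ai, ai+1, bi, bi+1))
--                     ai += 1
--                     bi += 1
--                     i1 = ai
--                     j1 = bi
--                 else:
--                     if tag != "delete" and bi < j2:
--                         bi += 1
--                     if tag != "insert" and ai < i2:
--                         ai += 1
--             # Emit any trailing chunk that didn't end with an equal
--             if (tag == "replace" and (i1 != i2 or j1 != j2)) or \
--                (tag == "delete" and i1 != i2) or \
--                (tag == "insert" and j1 != j2):
--                 result.append((tag, i1, i2, j1, j2))
--         else:
--             result.append((tag, i1, i2, j1, j2))
--     return result
-- ===== SOURCE B (Python) =====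
-- def split_chunks_at_equal_lines(opcodes, a, b):
--     # Table-then-stitch: only 'replace' blocks can split; compute matching diagonal
--     # offsets first, then stitch chunks between them. delete/insert pass through
--     # (dropped when their own range is empty), other tags pass through unchanged.
--     result = []
--     for tag, i1, i2, j1, j2 in opcodes:
--         if tag == "replace":
--             n = min(i2 - i1, j2 - j1)
--             splits = [k for k in range(n)
--                       if a[i1 + k] == b[j1 + k] and a[i1 + k].strip() != ""]
--             pi, pj = i1, j1
--             for k in splits:
--                 if pi < i1 + k:
--                     result.append(("replace", pi, i1 + k, pj, j1 + k))
--                 result.append(("equal", i1 + k, i1 + k + 1, j1 + k, j1 + k + 1))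
--                 pi, pj = i1 + k + 1, j1 + k + 1
--             if pi != i2 or pj != j2:
--                 result.append(("replace", pi, i2, pj, j2))
--         elif tag == "delete":
--             if i1 != i2:
--                 result.append((tag, i1, i2, j1, j2))
--         elif tag == "insert":
--             if j1 != j2:
--                 result.append((tag, i1, i2, j1, j2))
--         else:
--             result.append((tag, i1, i2, j1, j2))
--     return result
-- ===== Notes on version B (the rewrite author's own statement) =====
-- stated objective: simpler
-- what changed: Only 'replace' opcodes are scanned: B first tabulates the matching non-blank diagonal offsets of a replace block with a comprehension and then stitches the output chunks between consecutive split points in a second pass, while delete/insert blocks pass through untouched (dropped when their own range is empty), replacing A's interleaved three-tag two-pointer state machine.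
import Mathlib
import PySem

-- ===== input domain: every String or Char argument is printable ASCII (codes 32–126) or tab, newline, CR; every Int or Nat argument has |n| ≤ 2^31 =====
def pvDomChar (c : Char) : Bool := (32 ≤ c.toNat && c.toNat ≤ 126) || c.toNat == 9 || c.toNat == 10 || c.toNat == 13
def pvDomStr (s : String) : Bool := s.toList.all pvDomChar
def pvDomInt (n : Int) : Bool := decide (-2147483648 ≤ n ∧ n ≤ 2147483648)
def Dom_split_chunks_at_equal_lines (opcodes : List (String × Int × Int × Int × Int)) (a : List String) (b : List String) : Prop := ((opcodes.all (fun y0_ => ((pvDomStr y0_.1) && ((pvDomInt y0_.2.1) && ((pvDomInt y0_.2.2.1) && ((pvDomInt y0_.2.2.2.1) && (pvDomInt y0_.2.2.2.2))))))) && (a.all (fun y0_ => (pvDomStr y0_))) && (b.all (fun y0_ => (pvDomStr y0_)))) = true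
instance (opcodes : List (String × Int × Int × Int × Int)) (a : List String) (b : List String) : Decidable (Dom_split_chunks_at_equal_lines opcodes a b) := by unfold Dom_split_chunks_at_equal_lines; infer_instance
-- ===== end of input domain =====

-- B replaces A's interleaved three-tag two-pointer state machine by: delete/insert/other
-- opcodes pass straight through, and each 'replace' block is handled in two passes —
-- tabulate the matching non-blank diagonal offsets, then stitch chunks between them.
-- Objective: simpler decomposition; same asymptotic cost.

-- ===== PORT A =====
-- the while-loop of A, with fuel (the loop can diverge on malformed delete/insert
-- opcodes; those inputs are outside Pre_, where the fuel is provably sufficient);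
-- state: ai bi i1 j1 result; returns final (i1, j1, result)
def pvLoopA (tag : String) (i2 j2 : Int) (a b : List String) :
    Nat → Int → Int → Int → Int → List (String × Int × Int × Int × Int) →
    Int × Int × List (String × Int × Int × Int × Int)
  | 0, _, _, i1, j1, res => (i1, j1, res)
  | fuel+1, ai, bi, i1, j1, res =>
    if ai < i2 ∨ bi < j2 then
      if ai < i2 ∧ bi < j2 ∧ PySem.List.pyGet? a ai = PySem.List.pyGet? b bi ∧
          PySem.Str.strip ((PySem.List.pyGet? a ai).getD "") ≠ "" then
        let res1 := if ai > i1 ∨ bi > j1 then res ++ [(tag, i1, ai, j1, bi)] else res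
        pvLoopA tag i2 j2 a b fuel (ai+1) (bi+1) (ai+1) (bi+1)
          (res1 ++ [("equal", ai, ai+1, bi, bi+1)])
      else
        let bi' := if tag ≠ "delete" ∧ bi < j2 then bi + 1 else bi
        let ai' := if tag ≠ "insert" ∧ ai < i2 then ai + 1 else ai
        pvLoopA tag i2 j2 a b fuel ai' bi' i1 j1 res
    else (i1, j1, res)

-- one iteration of A's 'for tag, i1, i2, j1, j2 in opcodes' body
def pvStepA (a b : List String) (res : List (String × Int × Int × Int × Int))
    (c : String × Int × Int × Int × Int) : List (String × Int × Int × Int × Int) :=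
  match c with
  | (tag, i1, i2, j1, j2) =>
    if tag = "replace" ∨ tag = "delete" ∨ tag = "insert" then
      match pvLoopA tag i2 j2 a b ((i2 - i1).toNat + (j2 - j1).toNat + 1) i1 j1 i1 j1 res with
      | (i1', j1', res') =>
        if (tag = "replace" ∧ (i1' ≠ i2 ∨ j1' ≠ j2)) ∨ (tag = "delete" ∧ i1' ≠ i2) ∨
            (tag = "insert" ∧ j1' ≠ j2) then
          res' ++ [(tag, i1', i2, j1', j2)]
        else res'
    else res ++ [(tag, i1, i2, j1, j2)]

def split_chunks_at_equal_lines (opcodes : List (String × Int × Int × Int × Int)) (a : List String) (b : List String) : List (String × Int × Int × Int × Int) :=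
  opcodes.foldl (pvStepA a b) []

-- ===== PORT B =====
-- Source B's 'for k in splits' stitching loop; state (pi, pj, result)
def pvStitchB (i1 j1 : Int) :
    List Int → Int → Int → List (String × Int × Int × Int × Int) →
    Int × Int × List (String × Int × Int × Int × Int)
  | [], pi, pj, res => (pi, pj, res)
  | k :: ks, pi, pj, res =>
    let res1 := if pi < i1 + k then res ++ [("replace", pi, i1 + k, pj, j1 + k)] else res
    pvStitchB i1 j1 ks (i1 + k + 1) (j1 + k + 1)
      (res1 ++ [("equal", i1 + k, i1 + k + 1, j1 + k, j1 + k + 1)])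

-- one iteration of Source B's for-loop body
def pvStepB (a b : List String) (res : List (String × Int × Int × Int × Int))
    (c : String × Int × Int × Int × Int) : List (String × Int × Int × Int × Int) :=
  match c with
  | (tag, i1, i2, j1, j2) =>
    if tag = "replace" then
      let splits := (PySem.List.pyRange 0 (min (i2 - i1) (j2 - j1)) 1).filter (fun k =>
        decide (PySem.List.pyGet? a (i1 + k) = PySem.List.pyGet? b (j1 + k)) &&
        decide (PySem.Str.strip ((PySem.List.pyGet? a (i1 + k)).getD "") ≠ ""))
      match pvStitchB i1 j1 splits i1 j1 res with
      | (pi, pj, res') =>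
        if pi ≠ i2 ∨ pj ≠ j2 then res' ++ [("replace", pi, i2, pj, j2)] else res'
    else if tag = "delete" then
      if i1 ≠ i2 then res ++ [(tag, i1, i2, j1, j2)] else res
    else if tag = "insert" then
      if j1 ≠ j2 then res ++ [(tag, i1, i2, j1, j2)] else res
    else res ++ [(tag, i1, i2, j1, j2)]

def split_chunks_at_equal_lines_alt (opcodes : List (String × Int × Int × Int × Int)) (a : List String) (b : List String) : List (String × Int × Int × Int × Int) :=
  opcodes.foldl (pvStepB a b) []

-- ===== PRECONDITION & SPEC =====
-- Pre_ restricts to well-formed difflib-style opcodes: a 'replace' span only touches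
-- in-range (possibly negative, Python-wraparound) indices — outside that Python raises
-- IndexError — and 'delete' spans have no unconsumed b-range (j2 ≤ j1) and 'insert'
-- spans no unconsumed a-range (i2 ≤ i1): on malformed delete/insert spans A usually
-- loops forever, and where it does return (lockstep-equal lines) its value is an
-- accident of the pointer dance.
def Pre_split_chunks_at_equal_lines (opcodes : List (String × Int × Int × Int × Int)) (a : List String) (b : List String) : Prop :=
  ∀ c ∈ opcodes,
    (c.1 = "replace" →
      (0 < min (c.2.2.1 - c.2.1) (c.2.2.2.2 - c.2.2.2.1) →
        -(a.length : Int) ≤ c.2.1 ∧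
        c.2.1 + min (c.2.2.1 - c.2.1) (c.2.2.2.2 - c.2.2.2.1) ≤ (a.length : Int) ∧
        -(b.length : Int) ≤ c.2.2.2.1 ∧
        c.2.2.2.1 + min (c.2.2.1 - c.2.1) (c.2.2.2.2 - c.2.2.2.1) ≤ (b.length : Int))) ∧
    (c.1 = "delete" → c.2.2.2.2 ≤ c.2.2.2.1) ∧
    (c.1 = "insert" → c.2.2.1 ≤ c.2.1)
instance (opcodes : List (String × Int × Int × Int × Int)) (a : List String) (b : List String) : Decidable (Pre_split_chunks_at_equal_lines opcodes a b) := by unfold Pre_split_chunks_at_equal_lines; infer_instance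

def pvWitness_split_chunks_at_equal_lines : (List (String × Int × Int × Int × Int)) × List String × List String :=
  ([("replace", 0, 3, 0, 3), ("delete", 3, 4, 3, 3), ("equal", 4, 5, 3, 4)],
   ["x", "y", "z", "w", "s"], ["x", "q", "z", "s"])

def Spec_split_chunks_at_equal_lines (opcodes : List (String × Int × Int × Int × Int)) (a : List String) (b : List String) (out : List (String × Int × Int × Int × Int)) : Prop := out = split_chunks_at_equal_lines_alt opcodes a b
instance (opcodes : List (String × Int × Int × Int × Int)) (a : List String) (b : List String) (out : List (String × Int × Int × Int × Int)) : Decidable (Spec_split_chunks_at_equal_lines opcodes a b out) := by unfold Spec_split_chunks_at_equal_lines; infer_instance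

-- ===== CLAIM (what is proved, stated in full; the proofs are below) =====
def Claim_equal_split_chunks_at_equal_lines : Prop := ∀ (opcodes : List (String × Int × Int × Int × Int)) (a : List String) (b : List String), Dom_split_chunks_at_equal_lines opcodes a b → Pre_split_chunks_at_equal_lines opcodes a b → Spec_split_chunks_at_equal_lines opcodes a b (split_chunks_at_equal_lines opcodes a b)

-- ===== LEMMAS AND PROOFS =====

-- once one side of a 'replace' span is exhausted, the loop only drains the other
-- side and changes none of i1, j1, result
theorem pvLoopA_replace_tail (i2 j2 : Int) (a b : List String) :
    ∀ (fuel : Nat) (ai bi i1 j1 : Int) (res : List (String × Int × Int × Int × Int)),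
      ¬ (ai < i2 ∧ bi < j2) →
      (i2 - ai).toNat + (j2 - bi).toNat + 1 ≤ fuel →
      pvLoopA "replace" i2 j2 a b fuel ai bi i1 j1 res = (i1, j1, res) := by
  intro fuel
  induction fuel with
  | zero => intro ai bi i1 j1 res _ hf; omega
  | succ fuel ih =>
    intro ai bi i1 j1 res h hf
    by_cases hc : ai < i2 ∨ bi < j2
    · simp only [pvLoopA, if_pos hc]
      rw [if_neg (fun hcon => h ⟨hcon.1, hcon.2.1⟩)]
      by_cases hbi : bi < j2
      · have hai : ¬ ai < i2 := fun hai => h ⟨hai, hbi⟩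
        rw [if_neg (fun hcon => hai hcon.2), if_pos ⟨by decide, hbi⟩]
        exact ih ai (bi + 1) i1 j1 res (fun hcon => hai hcon.1) (by omega)
      · have hai : ai < i2 := by rcases hc with h' | h' <;> omega
        rw [if_pos ⟨by decide, hai⟩, if_neg (fun hcon => hbi hcon.2)]
        exact ih (ai + 1) bi i1 j1 res (fun hcon => hbi hcon.2) (by omega)
    · simp only [pvLoopA, if_neg hc]

-- a well-formed 'delete' span never fires the equal branch and returns its state
theorem pvLoopA_delete (i2 j2 : Int) (a b : List String) :
    ∀ (fuel : Nat) (ai bi i1 j1 : Int) (res : List (String × Int × Int × Int × Int)),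
      j2 ≤ bi → (i2 - ai).toNat + 1 ≤ fuel →
      pvLoopA "delete" i2 j2 a b fuel ai bi i1 j1 res = (i1, j1, res) := by
  intro fuel
  induction fuel with
  | zero => intro ai bi i1 j1 res _ hf; omega
  | succ fuel ih =>
    intro ai bi i1 j1 res hb hf
    have hbi : ¬ bi < j2 := by omega
    by_cases hai : ai < i2
    · simp only [pvLoopA, if_pos (Or.inl hai)]
      rw [if_neg (fun hcon => hbi hcon.2.1)]
      rw [if_pos ⟨by decide, hai⟩, if_neg (fun hcon => hcon.1 rfl)]
      exact ih (ai + 1) bi i1 j1 res hb (by omega)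
    · have hc : ¬ (ai < i2 ∨ bi < j2) := by tauto
      simp only [pvLoopA, if_neg hc]

-- a well-formed 'insert' span never fires the equal branch and returns its state
theorem pvLoopA_insert (i2 j2 : Int) (a b : List String) :
    ∀ (fuel : Nat) (ai bi i1 j1 : Int) (res : List (String × Int × Int × Int × Int)),
      i2 ≤ ai → (j2 - bi).toNat + 1 ≤ fuel →
      pvLoopA "insert" i2 j2 a b fuel ai bi i1 j1 res = (i1, j1, res) := by
  intro fuel
  induction fuel with
  | zero => intro ai bi i1 j1 res _ hf; omega
  | succ fuel ih =>
    intro ai bi i1 j1 res ha hf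
    have hai : ¬ ai < i2 := by omega
    by_cases hbi : bi < j2
    · simp only [pvLoopA, if_pos (Or.inr hbi)]
      rw [if_neg (fun hcon => hai hcon.1)]
      rw [if_neg (fun hcon => hcon.1 rfl), if_pos ⟨by decide, hbi⟩]
      exact ih ai (bi + 1) i1 j1 res ha (by omega)
    · have hc : ¬ (ai < i2 ∨ bi < j2) := by tauto
      simp only [pvLoopA, if_neg hc]

-- the diagonal phase of a 'replace' span equals B's filter-then-stitch
theorem pvLoopA_replace_diag (i2 j2 : Int) (a b : List String) (i0 j0 : Int) :
    ∀ (fuel : Nat) (k : Nat) (p q : Int) (res : List (String × Int × Int × Int × Int)),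
      q - j0 = p - i0 → p ≤ i0 + k →
      (i2 - (i0 + k)).toNat + (j2 - (j0 + k)).toNat + 1 ≤ fuel →
      pvLoopA "replace" i2 j2 a b fuel (i0 + k) (j0 + k) p q res =
        pvStitchB i0 j0
          ((PySem.List.pyRange k (min (i2 - i0) (j2 - j0)) 1).filter (fun k' =>
            decide (PySem.List.pyGet? a (i0 + k') = PySem.List.pyGet? b (j0 + k')) &&
            decide (PySem.Str.strip ((PySem.List.pyGet? a (i0 + k')).getD "") ≠ "")))
          p q res := by
  intro fuel
  induction fuel with
  | zero => intro k p q res _ _ hf; omega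
  | succ fuel ih =>
    intro k p q res h1 h2 hf
    by_cases hk : (k : Int) < min (i2 - i0) (j2 - j0)
    · have hklt1 : i0 + (k : Int) < i2 := by
        have := min_le_left (i2 - i0) (j2 - j0); omega
      have hklt2 : j0 + (k : Int) < j2 := by
        have := min_le_right (i2 - i0) (j2 - j0); omega
      rw [PySem.List.pyRange_one_cons hk]
      by_cases hc1 : PySem.List.pyGet? a (i0 + (k : Int)) = PySem.List.pyGet? b (j0 + (k : Int)) ∧
          PySem.Str.strip ((PySem.List.pyGet? a (i0 + (k : Int))).getD "") ≠ ""
      · rw [List.filter_cons_of_pos (by simpa using hc1)]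
        simp only [pvLoopA, pvStitchB]
        rw [if_pos (Or.inl hklt1), if_pos ⟨hklt1, hklt2, hc1.1, hc1.2⟩]
        simp only [show (i0 + (k : Int) > p ∨ j0 + (k : Int) > q) ↔ (p < i0 + (k : Int)) from
          by omega]
        have h := ih (k + 1) (i0 + (k : Int) + 1) (j0 + (k : Int) + 1)
          ((if p < i0 + (k : Int) then res ++ [("replace", p, i0 + (k : Int), q, j0 + (k : Int))] else res) ++
            [("equal", i0 + (k : Int), i0 + (k : Int) + 1, j0 + (k : Int), j0 + (k : Int) + 1)])
          (by omega) (by push_cast; omega) (by push_cast; omega)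
        push_cast at h
        simp only [← add_assoc] at h
        exact h
      · rw [List.filter_cons_of_neg (by simpa using hc1)]
        simp only [pvLoopA]
        rw [if_pos (Or.inl hklt1)]
        rw [if_neg (fun hcon => hc1 ⟨hcon.2.2.1, hcon.2.2.2⟩)]
        rw [if_pos ⟨by decide, hklt1⟩, if_pos ⟨by decide, hklt2⟩]
        have h := ih (k + 1) p q res h1 (by push_cast; omega) (by push_cast; omega)
        push_cast at h
        simp only [← add_assoc] at h
        exact h
    · have hmin : min (i2 - i0) (j2 - j0) ≤ (k : Int) := not_lt.mp hk
      rw [PySem.List.pyRange_one_eq_nil hmin]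
      simp only [List.filter_nil, pvStitchB]
      apply pvLoopA_replace_tail i2 j2 a b (fuel + 1) _ _ p q res _ hf
      rcases le_total (i2 - i0) (j2 - j0) with hle | hle
      · rw [min_eq_left hle] at hmin; intro hcon; omega
      · rw [min_eq_right hle] at hmin; intro hcon; omega

-- the two per-opcode step functions agree on well-formed opcodes
theorem pvStep_eq (a b : List String) (c : String × Int × Int × Int × Int)
    (hrep : c.1 = "replace" →
      (0 < min (c.2.2.1 - c.2.1) (c.2.2.2.2 - c.2.2.2.1) →
        -(a.length : Int) ≤ c.2.1 ∧
        c.2.1 + min (c.2.2.1 - c.2.1) (c.2.2.2.2 - c.2.2.2.1) ≤ (a.length : Int) ∧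
        -(b.length : Int) ≤ c.2.2.2.1 ∧
        c.2.2.2.1 + min (c.2.2.1 - c.2.1) (c.2.2.2.2 - c.2.2.2.1) ≤ (b.length : Int)))
    (hdel : c.1 = "delete" → c.2.2.2.2 ≤ c.2.2.2.1)
    (hins : c.1 = "insert" → c.2.2.1 ≤ c.2.1)
    (res : List (String × Int × Int × Int × Int)) :
    pvStepA a b res c = pvStepB a b res c := by
  obtain ⟨tag, i1, i2, j1, j2⟩ := c
  by_cases h1 : tag = "replace"
  · subst h1
    have key := pvLoopA_replace_diag i2 j2 a b i1 j1
      ((i2 - i1).toNat + (j2 - j1).toNat + 1) 0 i1 j1 res (by omega) (by push_cast; omega)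
      (by push_cast; omega)
    push_cast at key
    simp only [add_zero] at key
    simp [pvStepA, pvStepB, key]
  · by_cases h2 : tag = "delete"
    · subst h2
      have hj : j2 ≤ j1 := hdel rfl
      have key := pvLoopA_delete i2 j2 a b ((i2 - i1).toNat + (j2 - j1).toNat + 1)
        i1 j1 i1 j1 res hj (by omega)
      simp [pvStepA, pvStepB, key]
    · by_cases h3 : tag = "insert"
      · subst h3
        have hi : i2 ≤ i1 := hins rfl
        have key := pvLoopA_insert i2 j2 a b ((i2 - i1).toNat + (j2 - j1).toNat + 1)
          i1 j1 i1 j1 res hi (by omega)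
        simp [pvStepA, pvStepB, key]
      · simp [pvStepA, pvStepB, h1, h2, h3]

theorem pvFoldl_eq (a b : List String) :
    ∀ (opcodes : List (String × Int × Int × Int × Int))
      (res : List (String × Int × Int × Int × Int)),
      Pre_split_chunks_at_equal_lines opcodes a b →
      opcodes.foldl (pvStepA a b) res = opcodes.foldl (pvStepB a b) res := by
  intro opcodes
  induction opcodes with
  | nil => intro res _; rfl
  | cons c cs ih =>
    intro res hpre
    obtain ⟨hrep, hdel, hins⟩ := hpre c (List.mem_cons_self ..)
    simp only [List.foldl_cons]
    rw [pvStep_eq a b c hrep hdel hins res]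
    exact ih _ (fun c' hc' => hpre c' (List.mem_cons_of_mem _ hc'))

-- ===== VERDICT (by name: the statement is the Claim_ definition above) =====
theorem split_chunks_at_equal_lines_spec : Claim_equal_split_chunks_at_equal_lines := by
  intro opcodes a b _ hpre
  unfold Spec_split_chunks_at_equal_lines split_chunks_at_equal_lines split_chunks_at_equal_lines_alt
  exact pvFoldl_eq a b opcodes [] hpre
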